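-- pv_equiv track=rewrite | github.com/paul-nguyen-1/sentiment-analysis-food | sentiment.py | categorize_diet
-- ===== SOURCE A (Python) =====
-- def categorize_diet(title, ingredients):
--     text = f"{title} {ingredients}".lower()
--     tags = []
--
--     if 'vegan' in text:
--         tags.append('Vegan')
--     elif 'vegetarian' in text or 'veggie' in text:
--         tags.append('Vegetarian')
--
--     if 'gluten free' in text:
--         tags.append('Gluten-Free')
--     if 'keto' in text or 'low carb' in text:
--         tags.append('Keto')
--     if 'paleo' in text:
--         tags.append('Paleo')
--
--     if 'chicken' in text or 'turkey' in text:
--         tags.append('Poultry')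
--     elif 'beef' in text or 'steak' in text:
--         tags.append('Beef')
--     elif 'pork' in text or 'bacon' in text:
--         tags.append('Pork')
--     elif any(word in text for word in ['fish', 'salmon', 'shrimp', 'seafood']):
--         tags.append('Seafood')
--
--     return tags if tags else ['Standard']
-- ===== SOURCE B (Python) =====
-- _KEYWORDS = ['vegan', 'vegetarian', 'veggie', 'gluten free', 'keto', 'low carb',
--              'paleo', 'chicken', 'turkey', 'beef', 'steak', 'pork', 'bacon',
--              'fish', 'salmon', 'shrimp', 'seafood']
--
--
-- def categorize_diet(title, ingredients):
--     text = f"{title} {ingredients}".lower()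
--     # single scan over text positions: one multi-pattern pass collects every
--     # keyword occurring anywhere in the text into a hit set
--     hits = set()
--     for i in range(len(text)):
--         for kw in _KEYWORDS:
--             if text.startswith(kw, i):
--                 hits.add(kw)
--
--     def pick(rules):
--         return next((tag for tag, kws in rules
--                      if any(k in hits for k in kws)), None)
--
--     found = [
--         pick([('Vegan', ['vegan']), ('Vegetarian', ['vegetarian', 'veggie'])]),
--         pick([('Gluten-Free', ['gluten free'])]),
--         pick([('Keto', ['keto', 'low carb'])]),
--         pick([('Paleo', ['paleo'])]),
--         pick([('Poultry', ['chicken', 'turkey']), ('Beef', ['beef', 'steak']),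
--               ('Pork', ['pork', 'bacon']),
--               ('Seafood', ['fish', 'salmon', 'shrimp', 'seafood'])]),
--     ]
--     tags = [t for t in found if t is not None]
--     return tags or ['Standard']
-- ===== Notes on version B (the rewrite author's own statement) =====
-- stated objective: alternative
-- what changed: Instead of seventeen independent substring searches in an if/elif chain, B makes one scan over the text positions (a naive multi-pattern matcher) collecting every matched keyword into a hit set, then derives the tag list from that set by precedence rules.
import Mathlib
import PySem

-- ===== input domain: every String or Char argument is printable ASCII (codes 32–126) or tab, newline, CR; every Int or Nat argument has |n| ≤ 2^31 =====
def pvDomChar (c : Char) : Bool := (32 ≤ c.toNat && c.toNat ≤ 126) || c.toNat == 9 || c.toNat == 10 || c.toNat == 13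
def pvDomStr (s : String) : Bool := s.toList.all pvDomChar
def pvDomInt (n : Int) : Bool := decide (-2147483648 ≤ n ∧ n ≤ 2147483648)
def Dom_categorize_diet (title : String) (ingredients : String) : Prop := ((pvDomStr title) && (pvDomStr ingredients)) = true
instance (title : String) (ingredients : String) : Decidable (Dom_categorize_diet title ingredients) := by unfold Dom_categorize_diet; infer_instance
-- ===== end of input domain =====

-- B replaces A's chain of independent substring searches by one scan over the text
-- positions that collects every matched keyword into a hit set, then derives the tags
-- from that set by precedence rules; return value only, no mutation.

-- ===== PORT A =====
def categorize_diet (title : String) (ingredients : String) : List String :=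
  let text := PySem.Str.lower (title ++ " " ++ ingredients)
  let tags : List String := []
  let tags :=
    if PySem.Str.isIn "vegan" text then tags ++ ["Vegan"]
    else if PySem.Str.isIn "vegetarian" text || PySem.Str.isIn "veggie" text then tags ++ ["Vegetarian"]
    else tags
  let tags := if PySem.Str.isIn "gluten free" text then tags ++ ["Gluten-Free"] else tags
  let tags := if PySem.Str.isIn "keto" text || PySem.Str.isIn "low carb" text then tags ++ ["Keto"] else tags
  let tags := if PySem.Str.isIn "paleo" text then tags ++ ["Paleo"] else tags
  let tags :=
    if PySem.Str.isIn "chicken" text || PySem.Str.isIn "turkey" text then tags ++ ["Poultry"]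
    else if PySem.Str.isIn "beef" text || PySem.Str.isIn "steak" text then tags ++ ["Beef"]
    else if PySem.Str.isIn "pork" text || PySem.Str.isIn "bacon" text then tags ++ ["Pork"]
    else if (["fish", "salmon", "shrimp", "seafood"]).any (fun word => PySem.Str.isIn word text) then tags ++ ["Seafood"]
    else tags
  if tags = [] then ["Standard"] else tags

-- ===== PORT B =====
def pvKeywords : List String :=
  ["vegan", "vegetarian", "veggie", "gluten free", "keto", "low carb", "paleo",
   "chicken", "turkey", "beef", "steak", "pork", "bacon", "fish", "salmon", "shrimp", "seafood"]

-- the scanning double loop building `hits`; `text.startswith(kw, i)` with 0 ≤ i ported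
-- exactly, by hand, as the prefix test on the suffix starting at i (no PySem primitive
-- takes a start offset)
def pvHits (text : List Char) : PySem.Set String :=
  (PySem.List.pyRange 0 text.length 1).foldl
    (fun s i => pvKeywords.foldl
      (fun s kw => if PySem.Chars.startswith (text.drop i.toNat) kw.toList then PySem.Set.add s kw else s) s)
    PySem.Set.empty

-- next((tag for tag, kws in rules if any(k in hits for k in kws)), None)
def pvPick (hits : PySem.Set String) (rules : List (String × List String)) : Option String :=
  rules.findSome? (fun r => if r.2.any (fun k => PySem.Set.contains hits k) then some r.1 else none)

def categorize_diet_alt (title : String) (ingredients : String) : List String :=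
  let text := PySem.Chars.lower (title ++ " " ++ ingredients).toList
  let hits := pvHits text
  let found := [
    pvPick hits [("Vegan", ["vegan"]), ("Vegetarian", ["vegetarian", "veggie"])],
    pvPick hits [("Gluten-Free", ["gluten free"])],
    pvPick hits [("Keto", ["keto", "low carb"])],
    pvPick hits [("Paleo", ["paleo"])],
    pvPick hits [("Poultry", ["chicken", "turkey"]), ("Beef", ["beef", "steak"]),
                 ("Pork", ["pork", "bacon"]), ("Seafood", ["fish", "salmon", "shrimp", "seafood"])]]
  let tags := found.filterMap id
  if tags.isEmpty then ["Standard"] else tags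

-- ===== PRECONDITION & SPEC =====
def Spec_categorize_diet (title : String) (ingredients : String) (out : List String) : Prop := out = categorize_diet_alt title ingredients
instance (title : String) (ingredients : String) (out : List String) : Decidable (Spec_categorize_diet title ingredients out) := by unfold Spec_categorize_diet; infer_instance

-- ===== CLAIM (what is proved, stated in full; the proofs are below) =====
def Claim_equal_categorize_diet : Prop := ∀ (title : String) (ingredients : String), Dom_categorize_diet title ingredients → Spec_categorize_diet title ingredients (categorize_diet title ingredients)

-- ===== LEMMAS AND PROOFS =====

-- membership in a set built by a filtered add-fold
lemma pvMemFoldAddIf {α : Type} [BEq α] [LawfulBEq α] (ks : List α) (P : α → Bool)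
    (s : PySem.Set α) (y : α) :
    y ∈ ks.foldl (fun s k => if P k then PySem.Set.add s k else s) s
      ↔ y ∈ s ∨ (y ∈ ks ∧ P y = true) := by
  induction ks generalizing s with
  | nil => simp
  | cons k ks ih =>
    simp only [List.foldl_cons, ih, List.mem_cons]
    by_cases h : P k = true
    · simp [h, PySem.Set.mem_add]
      constructor
      · rintro ((h1 | rfl) | h2)
        · exact Or.inl h1
        · exact Or.inr ⟨Or.inl rfl, h⟩
        · exact Or.inr ⟨Or.inr h2.1, h2.2⟩
      · rintro (h1 | ⟨(rfl | h2), hp⟩)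
        · exact Or.inl (Or.inl h1)
        · exact Or.inl (Or.inr rfl)
        · exact Or.inr ⟨h2, hp⟩
    · simp only [h]
      constructor
      · rintro (h1 | h2)
        · exact Or.inl h1
        · exact Or.inr ⟨Or.inr h2.1, h2.2⟩
      · rintro (h1 | ⟨(rfl | h2), hp⟩)
        · exact Or.inl h1
        · exact absurd hp h
        · exact Or.inr ⟨h2, hp⟩

lemma pvMemOuter (text : List Char) (l : List Int) (s : PySem.Set String) (kw : String) :
    kw ∈ l.foldl
        (fun s i => pvKeywords.foldl
          (fun s kw => if PySem.Chars.startswith (text.drop i.toNat) kw.toList then PySem.Set.add s kw else s) s) s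
      ↔ kw ∈ s ∨ (kw ∈ pvKeywords ∧
          ∃ i ∈ l, PySem.Chars.startswith (text.drop i.toNat) kw.toList = true) := by
  induction l generalizing s with
  | nil => simp
  | cons i l ih =>
    simp only [List.foldl_cons, ih, pvMemFoldAddIf, List.mem_cons]
    constructor
    · rintro ((h | ⟨hk, hp⟩) | ⟨hk, j, hj, hp⟩)
      · exact Or.inl h
      · exact Or.inr ⟨hk, i, Or.inl rfl, hp⟩
      · exact Or.inr ⟨hk, j, Or.inr hj, hp⟩
    · rintro (h | ⟨hk, j, (rfl | hj), hp⟩)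
      · exact Or.inl (Or.inl h)
      · exact Or.inl (Or.inr ⟨hk, hp⟩)
      · exact Or.inr ⟨hk, j, hj, hp⟩

lemma pvMemHits (text : List Char) (kw : String) :
    kw ∈ pvHits text
      ↔ kw ∈ pvKeywords ∧
        ∃ i ∈ PySem.List.pyRange 0 text.length 1,
          PySem.Chars.startswith (text.drop i.toNat) kw.toList = true := by
  unfold pvHits
  rw [pvMemOuter]
  simp [PySem.Set.empty]

-- the scan finds kw exactly when Python's `kw in text` holds (kw a nonempty keyword)
lemma pvContainsHits (text : List Char) (kw : String)
    (hk : kw ∈ pvKeywords) (hne : kw.toList ≠ []) :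
    PySem.Set.contains (pvHits text) kw = PySem.Chars.isIn kw.toList text := by
  rcases h : PySem.Chars.isIn kw.toList text with _ | _
  · rw [Bool.eq_false_iff]
    intro hc
    rw [PySem.Set.contains_iff, pvMemHits] at hc
    rcases hc with ⟨_, i, hi, hp⟩
    rw [PySem.Chars.startswith_iff] at hp
    have : PySem.Chars.isIn kw.toList text = true :=
      (PySem.Chars.exists_prefix_drop_iff_isIn _ _).mp ⟨i.toNat, hp⟩
    simp [this] at h
  · rw [PySem.Set.contains_iff, pvMemHits]
    obtain ⟨j, hp⟩ := (PySem.Chars.exists_prefix_drop_iff_isIn kw.toList text).mpr h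
    refine ⟨hk, (j : Int), ?_, ?_⟩
    · rw [PySem.List.mem_pyRange_one]
      have hjlt : j < text.length := by
        by_contra hge
        rw [Nat.not_lt] at hge
        rw [List.drop_eq_nil_of_le hge] at hp
        exact hne (List.prefix_nil.mp hp)
      omega
    · rw [PySem.Chars.startswith_iff]
      simpa using hp

-- each exclusive group of A equals the pvPick contribution of the matching B group
lemma pvG1 (text : List Char) (acc : List String) :
    (if PySem.Chars.isIn "vegan".toList text then acc ++ ["Vegan"]
     else if PySem.Chars.isIn "vegetarian".toList text || PySem.Chars.isIn "veggie".toList text then acc ++ ["Vegetarian"]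
     else acc)
      = acc ++ (pvPick (pvHits text) [("Vegan", ["vegan"]), ("Vegetarian", ["vegetarian", "veggie"])]).toList := by
  have h1 := pvContainsHits text "vegan" (by decide) (by decide)
  have h2 := pvContainsHits text "vegetarian" (by decide) (by decide)
  have h3 := pvContainsHits text "veggie" (by decide) (by decide)
  simp only [pvPick, List.findSome?, List.any, h1, h2, h3, Bool.or_false]
  cases b1 : PySem.Chars.isIn "vegan".toList text <;>
    cases b2 : PySem.Chars.isIn "vegetarian".toList text <;>
      cases b3 : PySem.Chars.isIn "veggie".toList text <;> simp

lemma pvGsingle (text : List Char) (acc : List String) (ks : List String) (tag : String) :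
    (∀ k ∈ ks, k ∈ pvKeywords ∧ k.toList ≠ []) →
    (if ks.any (fun k => PySem.Chars.isIn k.toList text) then acc ++ [tag] else acc)
      = acc ++ (pvPick (pvHits text) [(tag, ks)]).toList := by
  have hrw : ∀ ks' : List String, (∀ k ∈ ks', k ∈ pvKeywords ∧ k.toList ≠ []) →
      (ks'.any fun k => PySem.Set.contains (pvHits text) k)
        = (ks'.any fun k => PySem.Chars.isIn k.toList text) := by
    intro ks'
    induction ks' with
    | nil => intro _; rfl
    | cons k t ih =>
      intro hks
      simp only [List.any_cons,
        pvContainsHits text k (hks k (by simp)).1 (hks k (by simp)).2,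
        ih (fun x hx => hks x (by simp [hx]))]
  intro hks
  simp only [pvPick, List.findSome?, hrw ks hks]
  cases h : ks.any (fun k => PySem.Chars.isIn k.toList text) <;> simp

lemma pvG2 (text : List Char) (acc : List String) :
    (if PySem.Chars.isIn "gluten free".toList text then acc ++ ["Gluten-Free"] else acc)
      = acc ++ (pvPick (pvHits text) [("Gluten-Free", ["gluten free"])]).toList := by
  simpa using pvGsingle text acc ["gluten free"] "Gluten-Free" (by decide)

lemma pvG3 (text : List Char) (acc : List String) :
    (if PySem.Chars.isIn "keto".toList text || PySem.Chars.isIn "low carb".toList text then acc ++ ["Keto"] else acc)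
      = acc ++ (pvPick (pvHits text) [("Keto", ["keto", "low carb"])]).toList := by
  simpa using pvGsingle text acc ["keto", "low carb"] "Keto" (by decide)

lemma pvG4 (text : List Char) (acc : List String) :
    (if PySem.Chars.isIn "paleo".toList text then acc ++ ["Paleo"] else acc)
      = acc ++ (pvPick (pvHits text) [("Paleo", ["paleo"])]).toList := by
  simpa using pvGsingle text acc ["paleo"] "Paleo" (by decide)

lemma pvG5 (text : List Char) (acc : List String) :
    (if PySem.Chars.isIn "chicken".toList text || PySem.Chars.isIn "turkey".toList text then acc ++ ["Poultry"]
     else if PySem.Chars.isIn "beef".toList text || PySem.Chars.isIn "steak".toList text then acc ++ ["Beef"]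
     else if PySem.Chars.isIn "pork".toList text || PySem.Chars.isIn "bacon".toList text then acc ++ ["Pork"]
     else if (["fish", "salmon", "shrimp", "seafood"] : List String).any (fun word => PySem.Chars.isIn word.toList text) then acc ++ ["Seafood"]
     else acc)
      = acc ++ (pvPick (pvHits text)
          [("Poultry", ["chicken", "turkey"]), ("Beef", ["beef", "steak"]),
           ("Pork", ["pork", "bacon"]), ("Seafood", ["fish", "salmon", "shrimp", "seafood"])]).toList := by
  have h1 := pvContainsHits text "chicken" (by decide) (by decide)
  have h2 := pvContainsHits text "turkey" (by decide) (by decide)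
  have h3 := pvContainsHits text "beef" (by decide) (by decide)
  have h4 := pvContainsHits text "steak" (by decide) (by decide)
  have h5 := pvContainsHits text "pork" (by decide) (by decide)
  have h6 := pvContainsHits text "bacon" (by decide) (by decide)
  have h7 := pvContainsHits text "fish" (by decide) (by decide)
  have h8 := pvContainsHits text "salmon" (by decide) (by decide)
  have h9 := pvContainsHits text "shrimp" (by decide) (by decide)
  have h10 := pvContainsHits text "seafood" (by decide) (by decide)
  simp only [pvPick, List.findSome?, List.any, h1, h2, h3, h4, h5, h6, h7, h8, h9, h10, Bool.or_false]
  cases b1 : PySem.Chars.isIn "chicken".toList text <;>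
    cases b2 : PySem.Chars.isIn "turkey".toList text <;>
      cases b3 : PySem.Chars.isIn "beef".toList text <;>
        cases b4 : PySem.Chars.isIn "steak".toList text <;>
          cases b5 : PySem.Chars.isIn "pork".toList text <;>
            cases b6 : PySem.Chars.isIn "bacon".toList text <;>
              simp
  split_ifs <;> simp

-- ===== VERDICT (by name: the statement is the Claim_ definition above) =====
set_option maxHeartbeats 1000000 in
theorem categorize_diet_spec : Claim_equal_categorize_diet := by
  intro title ingredients _
  unfold Spec_categorize_diet
  simp only [categorize_diet, categorize_diet_alt, PySem.Str.isIn_eq, PySem.Str.toList_lower]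
  generalize PySem.Chars.lower (title ++ " " ++ ingredients).toList = text
  simp only [pvG1 text, pvG2 text, pvG3 text, pvG4 text, pvG5 text]
  cases pvPick (pvHits text) [("Vegan", ["vegan"]), ("Vegetarian", ["vegetarian", "veggie"])] <;>
    cases pvPick (pvHits text) [("Gluten-Free", ["gluten free"])] <;>
      cases pvPick (pvHits text) [("Keto", ["keto", "low carb"])] <;>
        cases pvPick (pvHits text) [("Paleo", ["paleo"])] <;>
          cases pvPick (pvHits text)
              [("Poultry", ["chicken", "turkey"]), ("Beef", ["beef", "steak"]),
               ("Pork", ["pork", "bacon"]), ("Seafood", ["fish", "salmon", "shrimp", "seafood"])] <;>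
            simp [List.filterMap]
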